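-- pv_equiv track=rewrite | github.com/yuuuuuuuuyyy/schedule-app | app.py | check_consecutive_safe
-- ===== SOURCE A (Python) =====
-- def check_consecutive_safe(timeline, index_to_change):
--     temp_line = timeline.copy()
--     temp_line[index_to_change] = 1
--     max_con = 0
--     current_con = 0
--     for val in temp_line:
--         if val == 1:
--             current_con += 1
--             max_con = max(max_con, current_con)
--         else:
--             current_con = 0
--     return max_con <= 6
-- ===== SOURCE B (Python) =====
-- def check_consecutive_safe(timeline, index_to_change):
--     temp_line = timeline.copy()
--     temp_line[index_to_change] = 1
--     best = 0
--     n = len(temp_line)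
--     i = 0
--     while i < n:
--         if temp_line[i] == 1:
--             j = i
--             while j < n and temp_line[j] == 1:
--                 j += 1
--             if j - i > best:
--                 best = j - i
--             i = j
--         else:
--             i += 1
--     return best <= 6
-- ===== Notes on version B (the rewrite author's own statement) =====
-- stated objective: alternative
-- what changed: Replaces the per-element running current/max counter fold with a two-pointer segment scan that jumps over each maximal run of 1s, records its length, and compares the longest run with 6.
import Mathlib
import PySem

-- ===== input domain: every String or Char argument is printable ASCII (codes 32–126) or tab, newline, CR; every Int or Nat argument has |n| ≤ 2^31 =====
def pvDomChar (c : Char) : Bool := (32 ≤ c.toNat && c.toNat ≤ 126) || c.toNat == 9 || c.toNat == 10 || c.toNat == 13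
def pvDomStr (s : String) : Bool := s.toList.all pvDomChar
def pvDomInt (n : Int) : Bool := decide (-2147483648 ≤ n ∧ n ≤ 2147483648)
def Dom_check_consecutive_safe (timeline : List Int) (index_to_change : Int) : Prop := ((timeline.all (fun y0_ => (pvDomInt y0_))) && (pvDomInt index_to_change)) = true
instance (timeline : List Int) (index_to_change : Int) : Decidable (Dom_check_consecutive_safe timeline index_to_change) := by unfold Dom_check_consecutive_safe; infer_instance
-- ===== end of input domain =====

-- B replaces A's running current/max counter fold with a two-pointer maximal-run scan; alternative decomposition, same cost.

-- ===== PORT A =====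
-- the for-loop over temp_line threading (max_con, current_con)
def check_consecutive_safe (timeline : List Int) (index_to_change : Int) : Bool :=
  let temp_line := PySem.List.pySetD timeline index_to_change 1
  let r := temp_line.foldl
    (fun (p : Int × Int) val =>
      if val = 1 then (max p.1 (p.2 + 1), p.2 + 1) else (p.1, (0 : Int)))
    ((0 : Int), (0 : Int))
  decide (r.1 ≤ 6)

-- ===== PORT B =====
-- inner while loop: advance j over the run of 1s starting at the current position (its length)
def pvLeadOnes (xs : List Int) : Int := ((xs.takeWhile (fun v => v == 1)).length : Int)

-- outer while loop: at a 1, measure the maximal run, keep the best, resume after it; else step on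
def pvAltRun : List Int → Int
  | [] => 0
  | x :: xs =>
    if x = 1 then
      max (1 + pvLeadOnes xs) (pvAltRun (xs.dropWhile (fun v => v == 1)))
    else pvAltRun xs
termination_by xs => xs.length
decreasing_by
  · exact Nat.lt_succ_of_le (List.length_dropWhile_le _ _)
  · exact Nat.lt_succ_self _

def check_consecutive_safe_alt (timeline : List Int) (index_to_change : Int) : Bool :=
  let temp_line := PySem.List.pySetD timeline index_to_change 1
  decide (pvAltRun temp_line ≤ 6)

-- ===== PRECONDITION & SPEC =====
-- A raises IndexError on 'temp_line[index_to_change] = 1' unless the index is in Python range.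
def Pre_check_consecutive_safe (timeline : List Int) (index_to_change : Int) : Prop :=
  PySem.Raise.InRange timeline.length index_to_change
instance (timeline : List Int) (index_to_change : Int) : Decidable (Pre_check_consecutive_safe timeline index_to_change) := by unfold Pre_check_consecutive_safe; infer_instance

def pvWitness_check_consecutive_safe : List Int × Int := ([0, 1, 1, 0, 1], 3)

def Spec_check_consecutive_safe (timeline : List Int) (index_to_change : Int) (out : Bool) : Prop := out = check_consecutive_safe_alt timeline index_to_change
instance (timeline : List Int) (index_to_change : Int) (out : Bool) : Decidable (Spec_check_consecutive_safe timeline index_to_change out) := by unfold Spec_check_consecutive_safe; infer_instance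

-- ===== CLAIM (what is proved, stated in full; the proofs are below) =====
def Claim_equal_check_consecutive_safe : Prop := ∀ (timeline : List Int) (index_to_change : Int), Dom_check_consecutive_safe timeline index_to_change → Pre_check_consecutive_safe timeline index_to_change → Spec_check_consecutive_safe timeline index_to_change (check_consecutive_safe timeline index_to_change)

-- ===== LEMMAS AND PROOFS =====

theorem pvLeadOnes_nonneg (xs : List Int) : 0 ≤ pvLeadOnes xs := by
  unfold pvLeadOnes; positivity

theorem pvAltRun_nonneg (xs : List Int) : 0 ≤ pvAltRun xs := by
  induction xs using pvAltRun.induct with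
  | case1 => simp [pvAltRun]
  | case2 xs ih =>
      rw [pvAltRun, if_pos rfl]
      have := pvLeadOnes_nonneg xs
      omega
  | case3 x xs hx ih => rw [pvAltRun, if_neg hx]; exact ih

theorem pvLeadOnes_cons_one (xs : List Int) : pvLeadOnes (1 :: xs) = 1 + pvLeadOnes xs := by
  simp [pvLeadOnes, List.takeWhile]
  omega

theorem pvLeadOnes_cons_ne (x : Int) (xs : List Int) (hx : x ≠ 1) : pvLeadOnes (x :: xs) = 0 := by
  have hx' : (x == 1) = false := by simp [hx]
  simp [pvLeadOnes, List.takeWhile, hx']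

theorem dropOnes_cons_one (xs : List Int) :
    (1 :: xs).dropWhile (fun v => v == 1) = xs.dropWhile (fun v => v == 1) := by
  simp [List.dropWhile]

theorem dropOnes_cons_ne (x : Int) (xs : List Int) (hx : x ≠ 1) :
    (x :: xs).dropWhile (fun v => v == 1) = x :: xs := by
  have hx' : (x == 1) = false := by simp [hx]
  simp [List.dropWhile, hx']

theorem pvAltRun_decomp (xs : List Int) :
    pvAltRun xs = max (pvLeadOnes xs) (pvAltRun (xs.dropWhile (fun v => v == 1))) := by
  cases xs with
  | nil => simp [pvAltRun, pvLeadOnes]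
  | cons x xs =>
      by_cases hx : x = 1
      · subst hx
        rw [pvAltRun, if_pos rfl, pvLeadOnes_cons_one, dropOnes_cons_one]
      · rw [pvAltRun, if_neg hx, pvLeadOnes_cons_ne x xs hx, dropOnes_cons_ne x xs hx,
            pvAltRun, if_neg hx]
        have := pvAltRun_nonneg xs
        omega

theorem fold_eq_altRun (xs : List Int) (m c : Int) (hc : 0 ≤ c) (hm : c ≤ m) :
    (xs.foldl
      (fun (p : Int × Int) val =>
        if val = 1 then (max p.1 (p.2 + 1), p.2 + 1) else (p.1, (0 : Int)))
      (m, c)).1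
    = max m (max (c + pvLeadOnes xs) (pvAltRun (xs.dropWhile (fun v => v == 1)))) := by
  induction xs generalizing m c with
  | nil => simp [pvLeadOnes, pvAltRun]; omega
  | cons x xs ih =>
      by_cases hx : x = 1
      · subst hx
        rw [List.foldl_cons, if_pos rfl, pvLeadOnes_cons_one, dropOnes_cons_one]
        rw [ih (max m (c + 1)) (c + 1) (by omega) (by omega)]
        have hlead := pvLeadOnes_nonneg xs
        have hnn := pvAltRun_nonneg (xs.dropWhile (fun v => v == 1))
        omega
      · rw [List.foldl_cons, if_neg hx, pvLeadOnes_cons_ne x xs hx, dropOnes_cons_ne x xs hx]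
        rw [ih m 0 le_rfl (by omega)]
        have h2 : pvAltRun (x :: xs) = pvAltRun xs := by rw [pvAltRun, if_neg hx]
        rw [h2, pvAltRun_decomp xs]
        have hnn := pvAltRun_nonneg (xs.dropWhile (fun v => v == 1))
        have hlead := pvLeadOnes_nonneg xs
        omega

-- ===== VERDICT (by name: the statement is the Claim_ definition above) =====
theorem check_consecutive_safe_spec : Claim_equal_check_consecutive_safe := by
  intro timeline index_to_change _ _
  unfold Spec_check_consecutive_safe check_consecutive_safe check_consecutive_safe_alt
  dsimp only
  rw [fold_eq_altRun _ 0 0 le_rfl le_rfl,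
      pvAltRun_decomp (PySem.List.pySetD timeline index_to_change 1)]
  simp only [decide_eq_decide]
  have hlead := pvLeadOnes_nonneg (PySem.List.pySetD timeline index_to_change 1)
  omega
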